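-- pv_equiv track=rewrite | github.com/AlexFigas/advent-of-code | pyvent-2024/solutions/day10/part2.py | count_distinct_trails
-- ===== SOURCE A (Python) =====
-- def get_neighbors(r, c, grid):
--     neighbors = []
--     for dr, dc in [(-1, 0), (1, 0), (0, -1), (0, 1)]:
--         nr, nc = r + dr, c + dc
--         if 0 <= nr < len(grid) and 0 <= nc < len(grid[0]):
--             neighbors.append((nr, nc))
--     return neighbors
--
-- def count_distinct_trails(grid, start, memo):
--     r, c = start
--     if (r, c) in memo:
--         return memo[(r, c)]
--
--     # If this position is a 9, it's the end of a trail
--     if grid[r][c] == 9: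
--         return 1
--
--     total_trails = 0
--     for nr, nc in get_neighbors(r, c, grid):
--         if grid[nr][nc] == grid[r][c] + 1:
--             total_trails += count_distinct_trails(grid, (nr, nc), memo)
--
--     memo[(r, c)] = total_trails
--     return total_trails
-- ===== SOURCE B (Python) =====
-- def count_distinct_trails(grid, start, memo):
--     # Bottom-up dynamic program over the whole grid instead of memoized
--     # recursion: resolve cells in decreasing height order into a table, then
--     # read off the start cell.  Reads memo but never writes it.
--     if start in memo:
--         return memo[start]
--     rows, cols = len(grid), len(grid[0])
--     cells = sorted(((i, j) for i in range(rows) for j in range(cols)),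
--                    key=lambda p: grid[p[0]][p[1]], reverse=True)
--     val = {}
--     for i, j in cells:
--         if (i, j) in memo:
--             val[(i, j)] = memo[(i, j)]
--         elif grid[i][j] == 9:
--             val[(i, j)] = 1
--         else:
--             h = grid[i][j] + 1
--             val[(i, j)] = sum(val[n]
--                               for n in ((i - 1, j), (i + 1, j), (i, j - 1), (i, j + 1))
--                               if 0 <= n[0] < rows and 0 <= n[1] < cols and grid[n[0]][n[1]] == h)
--     return val[start]
-- ===== Notes on version B (the rewrite author's own statement) =====
-- stated objective: alternative
-- what changed: Replaces the memoized recursive DFS with a bottom-up dynamic program: all grid cells are sorted by height in decreasing order and resolved iteratively into a table (honoring memo seeds and 9-cells), and the answer is read off at the start cell; B reads memo but never writes it, so the equivalence is about the return value only. Pre_ excludes ragged/empty grids and out-of-range starts (A raises IndexError there) and un-seeded starts with a negative coordinate, where A returns a value only through Python's negative-index wraparound while B's table has no such key and raises KeyError.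
-- outside the precondition, e.g. on count_distinct_trails([[9, 8], [7, 9]], (-1, -1), {}): A returns 1, B raises KeyError
import Mathlib
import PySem

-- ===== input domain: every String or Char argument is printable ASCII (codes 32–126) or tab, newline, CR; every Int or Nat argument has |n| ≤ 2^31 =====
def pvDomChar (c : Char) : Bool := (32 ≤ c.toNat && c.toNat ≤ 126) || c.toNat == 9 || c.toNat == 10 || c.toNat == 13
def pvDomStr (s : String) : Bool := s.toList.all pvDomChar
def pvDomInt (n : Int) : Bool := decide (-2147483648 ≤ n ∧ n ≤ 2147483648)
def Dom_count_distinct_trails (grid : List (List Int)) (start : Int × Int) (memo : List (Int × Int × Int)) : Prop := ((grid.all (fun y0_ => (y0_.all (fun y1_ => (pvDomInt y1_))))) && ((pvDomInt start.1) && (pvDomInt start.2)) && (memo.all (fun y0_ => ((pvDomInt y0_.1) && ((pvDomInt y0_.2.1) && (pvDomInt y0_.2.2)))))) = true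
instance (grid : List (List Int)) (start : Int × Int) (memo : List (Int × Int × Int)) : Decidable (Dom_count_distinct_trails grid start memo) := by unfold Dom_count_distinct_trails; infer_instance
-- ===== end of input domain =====

-- B replaces A's memoized recursive DFS by a height-sorted bottom-up table; equal return value on Pre_
-- (A mutates `memo` in place, B only reads it: the equivalence proved is about the return value only).

-- shared low-level helpers (Python indexing; the dict the harness builds from the memo triples)
def pvR (grid : List (List Int)) : Int := (grid.length : Int)                 -- len(grid)
def pvC (grid : List (List Int)) : Int := ((PySem.List.pyGetD grid 0 []).length : Int)  -- len(grid[0])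
def pvAt (grid : List (List Int)) (i j : Int) : Int :=                        -- grid[i][j], exact under Pre_
  PySem.List.pyGetD (PySem.List.pyGetD grid i []) j 0
def pvMemoDict (memo : List (Int × Int × Int)) : PySem.Dict (Int × Int) Int :=  -- dict built from (r, c, v) triples
  memo.foldl (fun d e => d.insert (e.1, e.2.1) e.2.2) PySem.Dict.empty

-- ===== PORT A =====

def pvGetNeighbors (r c : Int) (grid : List (List Int)) : List (Int × Int) :=
  [((-1 : Int), (0 : Int)), (1, 0), (0, -1), (0, 1)].foldl
    (fun acc d =>
      let nr := r + d.1
      let nc := c + d.2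
      if 0 ≤ nr ∧ nr < pvR grid ∧ 0 ≤ nc ∧ nc < pvC grid then acc ++ [(nr, nc)] else acc)
    []


-- A's recursion; the Nat fuel (cell count + 1) only makes it structural — it never runs out under Pre_.

def pvGoA (fuel : Nat) (grid : List (List Int)) (r c : Int) (memo : PySem.Dict (Int × Int) Int) :
    Int × PySem.Dict (Int × Int) Int :=
  match fuel with
  | 0 => (0, memo)
  | fuel + 1 =>
    match memo.get? (r, c) with
    | some v => (v, memo)
    | none =>
      if pvAt grid r c = 9 then (1, memo)
      else
        let res := (pvGetNeighbors r c grid).foldl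
          (fun (acc : Int × PySem.Dict (Int × Int) Int) n =>
            if pvAt grid n.1 n.2 = pvAt grid r c + 1 then
              let t := pvGoA fuel grid n.1 n.2 acc.2
              (acc.1 + t.1, t.2)
            else acc)
          (0, memo)
        (res.1, res.2.insert (r, c) res.1)


def count_distinct_trails (grid : List (List Int)) (start : Int × Int) (memo : List (Int × Int × Int)) : Int :=
  (pvGoA ((pvR grid * pvC grid).toNat + 1) grid start.1 start.2 (pvMemoDict memo)).1

-- ===== PORT B =====
def pvNbrs (p : Int × Int) : List (Int × Int) :=
  [(p.1 - 1, p.2), (p.1 + 1, p.2), (p.1, p.2 - 1), (p.1, p.2 + 1)]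

def pvCells (R C : Int) : List (Int × Int) :=
  (PySem.List.pyRange 0 R 1).flatMap (fun i => (PySem.List.pyRange 0 C 1).map (fun j => (i, j)))

-- one step of B's table loop; val[n] is a plain lookup in Python — the 0 default is never
-- reached under Pre_ (every uphill neighbor is resolved earlier in the descending order)

def pvStep (grid : List (List Int)) (md : PySem.Dict (Int × Int) Int)
    (d : PySem.Dict (Int × Int) Int) (p : Int × Int) : PySem.Dict (Int × Int) Int :=
  match md.get? p with
  | some v => d.insert p v
  | none =>
    if pvAt grid p.1 p.2 = 9 then d.insert p 1
    else
      let h := pvAt grid p.1 p.2 + 1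
      d.insert p
        (((pvNbrs p).filter
            (fun n => decide (0 ≤ n.1 ∧ n.1 < pvR grid ∧ 0 ≤ n.2 ∧ n.2 < pvC grid ∧ pvAt grid n.1 n.2 = h))).map
          (fun n => d.getD n 0)).sum


def count_distinct_trails_alt (grid : List (List Int)) (start : Int × Int) (memo : List (Int × Int × Int)) : Int :=
  let md := pvMemoDict memo
  match md.get? (start.1, start.2) with
  | some v => v
  | none =>
    let cells := PySem.List.sorted (pvCells (pvR grid) (pvC grid)) (fun p => pvAt grid p.1 p.2) true
    let val := cells.foldl (pvStep grid md) PySem.Dict.empty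
    (val.get? (start.1, start.2)).getD 0   -- val[start]: none = KeyError, outside Pre_

-- ===== PRECONDITION & SPEC =====
-- Pre_ admits a memo-seeded start and otherwise demands a rectangular nonempty grid with the start in
-- the plain range [0,R)×[0,C): outside that A raises IndexError, except for un-seeded starts with a
-- negative coordinate, where A returns a value only through Python's negative-index wraparound while
-- B's table has no such key and raises KeyError (see the cite in the claim).
def Pre_count_distinct_trails (grid : List (List Int)) (start : Int × Int) (memo : List (Int × Int × Int)) : Prop :=
  (∃ e ∈ memo, (e.1, e.2.1) = start) ∨
  (grid ≠ [] ∧ (∀ row ∈ grid, row.length = (grid.headD []).length) ∧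
    0 ≤ start.1 ∧ start.1 < pvR grid ∧ 0 ≤ start.2 ∧ start.2 < pvC grid)
instance (grid : List (List Int)) (start : Int × Int) (memo : List (Int × Int × Int)) : Decidable (Pre_count_distinct_trails grid start memo) := by unfold Pre_count_distinct_trails; infer_instance

def pvWitness_count_distinct_trails : List (List Int) × (Int × Int) × (List (Int × Int × Int)) :=
  ([[8, 9], [9, 9]], (0, 0), [])

def Spec_count_distinct_trails (grid : List (List Int)) (start : Int × Int) (memo : List (Int × Int × Int)) (out : Int) : Prop := out = count_distinct_trails_alt grid start memo
instance (grid : List (List Int)) (start : Int × Int) (memo : List (Int × Int × Int)) (out : Int) : Decidable (Spec_count_distinct_trails grid start memo out) := by unfold Spec_count_distinct_trails; infer_instance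

-- ===== CLAIM (what is proved, stated in full; the proofs are below) =====
def Claim_equal_count_distinct_trails : Prop := ∀ (grid : List (List Int)) (start : Int × Int) (memo : List (Int × Int × Int)), Dom_count_distinct_trails grid start memo → Pre_count_distinct_trails grid start memo → Spec_count_distinct_trails grid start memo (count_distinct_trails grid start memo)

-- ===== LEMMAS AND PROOFS =====

def pvInRange (grid : List (List Int)) (p : Int × Int) : Prop :=
  0 ≤ p.1 ∧ p.1 < pvR grid ∧ 0 ≤ p.2 ∧ p.2 < pvC grid

def pvRank (grid : List (List Int)) (v : Int) : Nat :=
  ((pvCells (pvR grid) (pvC grid)).filter (fun q => decide (v < pvAt grid q.1 q.2))).length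

theorem pv_mem_cells (R C : Int) (p : Int × Int) :
    p ∈ pvCells R C ↔ 0 ≤ p.1 ∧ p.1 < R ∧ 0 ≤ p.2 ∧ p.2 < C := by
  obtain ⟨a, b⟩ := p
  simp [pvCells, List.mem_flatMap, PySem.List.mem_pyRange_one, Prod.ext_iff]
  tauto

theorem pv_cells_length (R C : Int) (hR : 0 ≤ R) (hC : 0 ≤ C) :
    (pvCells R C).length = (R * C).toNat := by
  simp [pvCells, List.length_flatMap, PySem.List.length_pyRange_one]
  rw [Int.toNat_mul hR hC]

theorem pv_rank_lt_of_uphill (grid : List (List Int)) (p q : Int × Int)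
    (hq : pvInRange grid q) (hup : pvAt grid q.1 q.2 = pvAt grid p.1 p.2 + 1) :
    pvRank grid (pvAt grid q.1 q.2) < pvRank grid (pvAt grid p.1 p.2) := by
  unfold pvRank
  have hsub : ((pvCells (pvR grid) (pvC grid)).filter (fun x => decide (pvAt grid q.1 q.2 < pvAt grid x.1 x.2))).Sublist
      ((pvCells (pvR grid) (pvC grid)).filter (fun x => decide (pvAt grid p.1 p.2 < pvAt grid x.1 x.2))) := by
    apply List.monotone_filter_right
    intro x hx
    simp only [decide_eq_true_eq] at *
    omega
  rcases hsub.length_le.lt_or_eq with h | h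
  · exact h
  · exfalso
    have heq := hsub.eq_of_length h
    have hmem : q ∈ (pvCells (pvR grid) (pvC grid)).filter (fun x => decide (pvAt grid p.1 p.2 < pvAt grid x.1 x.2)) := by
      rw [List.mem_filter, pv_mem_cells]
      exact ⟨⟨hq.1, hq.2.1, hq.2.2.1, hq.2.2.2⟩, by simp; omega⟩
    rw [← heq, List.mem_filter] at hmem
    simp at hmem

theorem pv_rank_lt_card (grid : List (List Int)) (q : Int × Int) (hq : pvInRange grid q) :
    pvRank grid (pvAt grid q.1 q.2) < (pvCells (pvR grid) (pvC grid)).length := by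
  unfold pvRank
  have hsub : ((pvCells (pvR grid) (pvC grid)).filter (fun x => decide (pvAt grid q.1 q.2 < pvAt grid x.1 x.2))).Sublist
      (pvCells (pvR grid) (pvC grid)) := List.filter_sublist
  rcases hsub.length_le.lt_or_eq with h | h
  · exact h
  · exfalso
    have heq := hsub.eq_of_length h
    have hmem : q ∈ pvCells (pvR grid) (pvC grid) := by
      rw [pv_mem_cells]; exact ⟨hq.1, hq.2.1, hq.2.2.1, hq.2.2.2⟩
    rw [← heq, List.mem_filter] at hmem
    simp at hmem

def pvF (grid : List (List Int)) (md : PySem.Dict (Int × Int) Int) : Nat → (Int × Int) → Int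
  | 0, _ => 0
  | fuel + 1, p =>
    match md.get? p with
    | some v => v
    | none =>
      if pvAt grid p.1 p.2 = 9 then 1
      else
        (((pvNbrs p).filter
            (fun n => decide (0 ≤ n.1 ∧ n.1 < pvR grid ∧ 0 ≤ n.2 ∧ n.2 < pvC grid ∧ pvAt grid n.1 n.2 = pvAt grid p.1 p.2 + 1))).map
          (pvF grid md fuel)).sum

def pvFV (grid : List (List Int)) (md : PySem.Dict (Int × Int) Int) (p : Int × Int) : Int :=
  pvF grid md (pvRank grid (pvAt grid p.1 p.2) + 1) p

theorem pvF_stable (grid : List (List Int)) (md : PySem.Dict (Int × Int) Int) :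
    ∀ n m p, pvInRange grid p → pvRank grid (pvAt grid p.1 p.2) < n →
      pvRank grid (pvAt grid p.1 p.2) < m → pvF grid md n p = pvF grid md m p := by
  intro n
  induction n with
  | zero => intro m p _ h; omega
  | succ n ih =>
    intro m p hp hn hm
    match m, hm with
    | m + 1, hm =>
      simp only [pvF]
      cases md.get? p with
      | some v => rfl
      | none =>
        simp only []
        by_cases h9 : pvAt grid p.1 p.2 = 9
        · simp [h9]
        · simp only [h9, if_false]
          congr 1
          apply List.map_congr_left
          intro q hq
          rw [List.mem_filter] at hq
          simp only [decide_eq_true_eq] at hq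
          obtain ⟨hq0, hq1, hq2, hq3, hup⟩ := hq.2
          have hqr : pvInRange grid q := ⟨hq0, hq1, hq2, hq3⟩
          have hlt := pv_rank_lt_of_uphill grid p q hqr hup
          exact ih m q hqr (by omega) (by omega)

def pvInv (grid : List (List Int)) (md m : PySem.Dict (Int × Int) Int) : Prop :=
  (∀ q v, m.get? q = some v → pvInRange grid q → v = pvFV grid md q) ∧
  (∀ q w, md.get? q = some w → m.get? q = some w)

theorem pvGoA_fold (grid : List (List Int)) (md : PySem.Dict (Int × Int) Int) (fuel : Nat)
    (ihfuel : ∀ p m, pvInRange grid p → pvRank grid (pvAt grid p.1 p.2) < fuel → pvInv grid md m →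
      (pvGoA fuel grid p.1 p.2 m).1 = pvFV grid md p ∧ pvInv grid md (pvGoA fuel grid p.1 p.2 m).2)
    (h0 : Int) :
    ∀ (ns : List (Int × Int)) (tot : Int) (m : PySem.Dict (Int × Int) Int),
      (∀ n ∈ ns, pvAt grid n.1 n.2 = h0 + 1 → pvInRange grid n ∧ pvRank grid (pvAt grid n.1 n.2) < fuel) →
      pvInv grid md m →
      (ns.foldl
        (fun (acc : Int × PySem.Dict (Int × Int) Int) n =>
          if pvAt grid n.1 n.2 = h0 + 1 then
            (acc.1 + (pvGoA fuel grid n.1 n.2 acc.2).1, (pvGoA fuel grid n.1 n.2 acc.2).2)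
          else acc)
        (tot, m)).1
        = tot + ((ns.filter (fun n => decide (pvAt grid n.1 n.2 = h0 + 1))).map (pvFV grid md)).sum ∧
      pvInv grid md (ns.foldl
        (fun (acc : Int × PySem.Dict (Int × Int) Int) n =>
          if pvAt grid n.1 n.2 = h0 + 1 then
            (acc.1 + (pvGoA fuel grid n.1 n.2 acc.2).1, (pvGoA fuel grid n.1 n.2 acc.2).2)
          else acc)
        (tot, m)).2 := by
  intro ns
  induction ns with
  | nil => intro tot m _ hm; exact ⟨by simp, hm⟩
  | cons n ns ih =>
    intro tot m hns hm
    simp only [List.foldl_cons, List.filter_cons]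
    by_cases hup : pvAt grid n.1 n.2 = h0 + 1
    · obtain ⟨hnr, hrk⟩ := hns n (List.mem_cons_self) hup
      obtain ⟨hv, hm'⟩ := ihfuel n m hnr hrk hm
      simp only [hup, if_pos, decide_true]
      have := ih (tot + (pvGoA fuel grid n.1 n.2 m).1) (pvGoA fuel grid n.1 n.2 m).2
        (fun x hx hux => hns x (List.mem_cons_of_mem _ hx) hux) hm'
      simp only [List.map_cons, List.sum_cons]
      constructor
      · rw [this.1, hv]; ring
      · exact this.2
    · simp only [hup, decide_false]
      simpa using ih tot m (fun x hx hux => hns x (List.mem_cons_of_mem _ hx) hux) hm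

theorem pvGetNeighbors_eq (grid : List (List Int)) (r c : Int) :
    pvGetNeighbors r c grid =
      (pvNbrs (r, c)).filter (fun n => decide (0 ≤ n.1 ∧ n.1 < pvR grid ∧ 0 ≤ n.2 ∧ n.2 < pvC grid)) := by
  have hmap : pvNbrs (r, c) = [((-1 : Int), (0 : Int)), (1, 0), (0, -1), (0, 1)].map
      (fun d => (r + d.1, c + d.2)) := by
    simp [pvNbrs]
    constructor <;> ring
  rw [pvGetNeighbors, hmap, List.filter_map]
  rw [PySem.List.foldl_append_ite
    (p := fun d : Int × Int => 0 ≤ r + d.1 ∧ r + d.1 < pvR grid ∧ 0 ≤ c + d.2 ∧ c + d.2 < pvC grid)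
    (f := fun d : Int × Int => (r + d.1, c + d.2))]
  rw [List.nil_append]
  congr 1

theorem pv_filter_combined (grid : List (List Int)) (p : Int × Int) (h : Int) :
    ((pvNbrs p).filter (fun n => decide (0 ≤ n.1 ∧ n.1 < pvR grid ∧ 0 ≤ n.2 ∧ n.2 < pvC grid))).filter
        (fun n => decide (pvAt grid n.1 n.2 = h + 1))
      = (pvNbrs p).filter
        (fun n => decide (0 ≤ n.1 ∧ n.1 < pvR grid ∧ 0 ≤ n.2 ∧ n.2 < pvC grid ∧ pvAt grid n.1 n.2 = h + 1)) := by
  rw [List.filter_filter]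
  apply List.filter_congr
  intro x _
  simp only [← Bool.decide_and, decide_eq_decide]
  tauto

theorem pv_mem_getNeighbors (grid : List (List Int)) (r c : Int) (n : Int × Int)
    (hn : n ∈ pvGetNeighbors r c grid) : pvInRange grid n := by
  rw [pvGetNeighbors_eq, List.mem_filter] at hn
  have h := of_decide_eq_true (p := 0 ≤ n.1 ∧ n.1 < pvR grid ∧ 0 ≤ n.2 ∧ n.2 < pvC grid) hn.2
  exact h

theorem pvGoA_correct (grid : List (List Int)) (md : PySem.Dict (Int × Int) Int) :
    ∀ fuel p m, pvInRange grid p → pvRank grid (pvAt grid p.1 p.2) < fuel → pvInv grid md m →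
      (pvGoA fuel grid p.1 p.2 m).1 = pvFV grid md p ∧ pvInv grid md (pvGoA fuel grid p.1 p.2 m).2 := by
  intro fuel
  induction fuel with
  | zero => intro p m _ h; omega
  | succ fuel ih =>
    intro p m hp hrk hm
    cases hget : m.get? (p.1, p.2) with
    | some v =>
      simp only [pvGoA, hget]
      exact ⟨hm.1 (p.1, p.2) v hget (by simpa using hp), hm⟩
    | none =>
      simp only [pvGoA, hget]
      have hmd : md.get? (p.1, p.2) = none := by
        cases hmd' : md.get? (p.1, p.2) with
        | none => rfl
        | some w => rw [hm.2 (p.1, p.2) w hmd'] at hget; exact absurd hget (by simp)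
      have hmdp : md.get? p = none := by simpa using hmd
      by_cases h9 : pvAt grid p.1 p.2 = 9
      · simp only [h9, if_true]
        refine ⟨?_, hm⟩
        rw [pvFV]
        simp [pvF, hmdp, h9]
      · simp only [h9, if_false]
        obtain ⟨hsum, hinv⟩ := pvGoA_fold grid md fuel ih (pvAt grid p.1 p.2)
          (pvGetNeighbors p.1 p.2 grid) 0 m
          (by
            intro n hn hup
            have hnr := pv_mem_getNeighbors grid p.1 p.2 n hn
            refine ⟨hnr, ?_⟩
            have := pv_rank_lt_of_uphill grid p n hnr hup
            omega)
          hm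
        have hval : ((pvGetNeighbors p.1 p.2 grid).foldl
            (fun (acc : Int × PySem.Dict (Int × Int) Int) n =>
              if pvAt grid n.1 n.2 = pvAt grid p.1 p.2 + 1 then
                (acc.1 + (pvGoA fuel grid n.1 n.2 acc.2).1, (pvGoA fuel grid n.1 n.2 acc.2).2)
              else acc)
            (0, m)).1 = pvFV grid md p := by
          rw [hsum, pvFV]
          conv_rhs => rw [pvF]
          simp only [hmdp, h9, if_false]
          rw [pvGetNeighbors_eq, pv_filter_combined]
          rw [zero_add]
          congr 1
          apply List.map_congr_left
          intro q hq
          rw [List.mem_filter] at hq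
          simp only [decide_eq_true_eq] at hq
          obtain ⟨h1, h2, h3, h4, hup⟩ := hq.2
          have hqr : pvInRange grid q := ⟨h1, h2, h3, h4⟩
          have hlt := pv_rank_lt_of_uphill grid p q hqr hup
          exact (pvF_stable grid md _ _ q hqr (by omega) (by omega)).symm
        refine ⟨hval, ?_, ?_⟩
        · intro q v hq hqr
          rw [PySem.Dict.get?_insert] at hq
          by_cases hqp : q = (p.1, p.2)
          · rw [if_pos hqp] at hq
            have hv : v = pvFV grid md p := by
              rw [← hval]
              exact (Option.some.injEq _ _ |>.mp hq).symm
            rw [hv, hqp]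
          · rw [if_neg hqp] at hq
            exact hinv.1 q v hq hqr
        · intro q w hw
          rw [PySem.Dict.get?_insert]
          by_cases hqp : q = (p.1, p.2)
          · rw [hqp] at hw
            rw [hw] at hmd
            exact absurd hmd (by simp)
          · rw [if_neg hqp]
            exact hinv.2 q w hw

-- resolving one cell whose uphill neighbors are already resolved inserts its pvFV value
theorem pvStep_eq (grid : List (List Int)) (md : PySem.Dict (Int × Int) Int)
    (d : PySem.Dict (Int × Int) Int) (p : Int × Int)
    (hup : ∀ q, pvInRange grid q → pvAt grid q.1 q.2 = pvAt grid p.1 p.2 + 1 →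
      d.get? q = some (pvFV grid md q)) :
    pvStep grid md d p = d.insert p (pvFV grid md p) := by
  unfold pvStep
  cases hmd : md.get? p with
  | some v =>
    have : pvFV grid md p = v := by rw [pvFV]; simp [pvF, hmd]
    rw [this]
  | none =>
    by_cases h9 : pvAt grid p.1 p.2 = 9
    · have : pvFV grid md p = 1 := by rw [pvFV]; simp [pvF, hmd, h9]
      rw [if_pos h9, this]
    · rw [if_neg h9]
      have hv : (((pvNbrs p).filter
          (fun n => decide (0 ≤ n.1 ∧ n.1 < pvR grid ∧ 0 ≤ n.2 ∧ n.2 < pvC grid ∧ pvAt grid n.1 n.2 = pvAt grid p.1 p.2 + 1))).map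
            (fun n => d.getD n 0)).sum = pvFV grid md p := by
        rw [pvFV]
        conv_rhs => rw [pvF]
        simp only [hmd, h9, if_false]
        refine congrArg (List.sum (α := Int)) (List.map_congr_left ?_)
        intro q hq
        rw [List.mem_filter] at hq
        simp only [decide_eq_true_eq] at hq
        obtain ⟨h1, h2, h3, h4, hu⟩ := hq.2
        have hqr : pvInRange grid q := ⟨h1, h2, h3, h4⟩
        rw [PySem.Dict.getD_eq_get?_getD, hup q hqr hu]
        have hlt := pv_rank_lt_of_uphill grid p q hqr hu
        simp only [Option.getD_some]
        exact (pvF_stable grid md _ _ q hqr (by omega) (by omega)).symm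
      exact congrArg (d.insert p) hv

theorem pv_fold_table (grid : List (List Int)) (md : PySem.Dict (Int × Int) Int) :
    ∀ (L : List (Int × Int)) (d : PySem.Dict (Int × Int) Int),
      L.Pairwise (fun a b => pvAt grid b.1 b.2 ≤ pvAt grid a.1 a.2) →
      (∀ p ∈ L, pvInRange grid p) →
      (∀ p ∈ L, ∀ q, pvInRange grid q → pvAt grid q.1 q.2 = pvAt grid p.1 p.2 + 1 →
        (q ∈ L ∨ d.get? q = some (pvFV grid md q))) →
      ∀ q, (L.foldl (pvStep grid md) d).get? q =
        if q ∈ L then some (pvFV grid md q) else d.get? q := by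
  intro L
  induction L with
  | nil => intro d _ _ _ q; simp
  | cons p L ih =>
    intro d hpw hin hup q
    have hpmem : pvInRange grid p := hin p List.mem_cons_self
    have hstep : pvStep grid md d p = d.insert p (pvFV grid md p) := by
      apply pvStep_eq
      intro x hxr hxu
      rcases hup p List.mem_cons_self x hxr hxu with hx | hx
      · exfalso
        rcases List.mem_cons.mp hx with h | h
        · rw [h] at hxu; omega
        · have := (List.pairwise_cons.mp hpw).1 x h
          omega
      · exact hx
    rw [List.foldl_cons, hstep]
    have := ih (d.insert p (pvFV grid md p)) (List.pairwise_cons.mp hpw).2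
      (fun x hx => hin x (List.mem_cons_of_mem _ hx))
      (by
        intro x hx y hyr hyu
        rcases hup x (List.mem_cons_of_mem _ hx) y hyr hyu with hy | hy
        · rcases List.mem_cons.mp hy with h | h
          · right
            rw [PySem.Dict.get?_insert, if_pos h, h]
          · exact Or.inl h
        · right
          rw [PySem.Dict.get?_insert]
          by_cases hyp : y = p
          · rw [if_pos hyp, hyp]
          · rw [if_neg hyp]; exact hy)
      q
    rw [this]
    by_cases hqL : q ∈ L
    · rw [if_pos hqL, if_pos (List.mem_cons_of_mem _ hqL)]
    · rw [if_neg hqL, PySem.Dict.get?_insert]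
      by_cases hqp : q = p
      · rw [if_pos hqp, if_pos (by rw [hqp]; exact List.mem_cons_self), hqp]
      · rw [if_neg hqp, if_neg (by simp [List.mem_cons, hqp, hqL])]

theorem pv_memoDict_contains (memo : List (Int × Int × Int)) (k : Int × Int)
    (h : ∃ e ∈ memo, (e.1, e.2.1) = k) : ((pvMemoDict memo).get? k).isSome := by
  have hkeys : (pvMemoDict memo).keys = PySem.Set.update (PySem.Dict.empty (κ := Int × Int) (ν := Int)).keys
      (memo.map (fun e => (e.1, e.2.1))) :=
    PySem.Dict.keys_foldl_insert_key memo (fun e => (e.1, e.2.1)) (fun _ e => e.2.2) _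
  have hmem : k ∈ (pvMemoDict memo).keys := by
    rw [hkeys]
    have h1 : k ∈ memo.map (fun e => (e.1, e.2.1)) := by
      obtain ⟨e, he, hk⟩ := h
      exact List.mem_map.mpr ⟨e, he, hk⟩
    have h2 : PySem.Set.update (PySem.Dict.empty (κ := Int × Int) (ν := Int)).keys
        (memo.map (fun e => (e.1, e.2.1))) = PySem.Set.ofList (memo.map (fun e => (e.1, e.2.1))) := rfl
    rw [h2]
    exact (PySem.Set.mem_ofList _ k).mpr h1
  cases hget : (pvMemoDict memo).get? k with
  | some v => simp
  | none => exact absurd ((PySem.Dict.get?_eq_none_iff_not_mem_keys _ k).mp hget) (by simp [hmem])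

theorem count_distinct_trails_eq (grid : List (List Int)) (start : Int × Int) (memo : List (Int × Int × Int))
    (hPre : Pre_count_distinct_trails grid start memo) :
    count_distinct_trails grid start memo = count_distinct_trails_alt grid start memo := by
  unfold count_distinct_trails count_distinct_trails_alt
  cases hget : (pvMemoDict memo).get? (start.1, start.2) with
  | some v =>
    simp only [pvGoA, hget]
  | none =>
    simp only [hget]
    rcases hPre with hseed | ⟨hne, hrect, hr1, hr2, hc1, hc2⟩
    · have hs := pv_memoDict_contains memo (start.1, start.2) (by simpa using hseed)
      rw [hget] at hs
      simp at hs
    · have hstartr : pvInRange grid start := ⟨hr1, hr2, hc1, hc2⟩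
      have hlen : (pvCells (pvR grid) (pvC grid)).length = (pvR grid * pvC grid).toNat :=
        pv_cells_length _ _ (by omega) (by omega)
      have hInv0 : pvInv grid (pvMemoDict memo) (pvMemoDict memo) := by
        constructor
        · intro q v hq _
          rw [pvFV]
          simp [pvF, hq]
        · intro q w hw
          exact hw
      have hrk : pvRank grid (pvAt grid start.1 start.2) < (pvR grid * pvC grid).toNat + 1 := by
        have := pv_rank_lt_card grid start hstartr
        omega
      -- A side: the memoized recursion computes pvFV at the start
      have hA := (pvGoA_correct grid (pvMemoDict memo) ((pvR grid * pvC grid).toNat + 1) start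
        (pvMemoDict memo) hstartr hrk hInv0).1
      rw [hA]
      -- B side: the table resolves every in-range cell to pvFV
      have htab := pv_fold_table grid (pvMemoDict memo)
        (PySem.List.sorted (pvCells (pvR grid) (pvC grid)) (fun p => pvAt grid p.1 p.2) true)
        PySem.Dict.empty
        (PySem.List.sorted_pairwise_rev _ _)
        (by
          intro p hp
          rw [PySem.List.mem_sorted] at hp
          exact (pv_mem_cells _ _ p).mp hp)
        (by
          intro p _ q hq _
          left
          rw [PySem.List.mem_sorted]
          exact (pv_mem_cells _ _ q).mpr ⟨hq.1, hq.2.1, hq.2.2.1, hq.2.2.2⟩)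
        (start.1, start.2)
      have hmemS : (start.1, start.2) ∈ PySem.List.sorted (pvCells (pvR grid) (pvC grid)) (fun p => pvAt grid p.1 p.2) true := by
        rw [PySem.List.mem_sorted]
        exact (pv_mem_cells _ _ _).mpr ⟨hr1, hr2, hc1, hc2⟩
      rw [htab, if_pos hmemS]
      rfl

-- ===== VERDICT (by name: the statement is the Claim_ definition above) =====
theorem count_distinct_trails_spec : Claim_equal_count_distinct_trails := by
  intro grid start memo _ hPre
  exact count_distinct_trails_eq grid start memo hPre
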